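-- pv_equiv track=rewrite | github.com/cjcoops/advent-of-code-2023 | src/09/01.py | getLastNumbersOfDifferenceSequences
-- ===== SOURCE A (Python) =====
-- def getLastNumbersOfDifferenceSequences(history: list[int]) -> list[int]:
--     sequences = [history]
--
--     while not all(x == 0 for x in sequences[-1]):
--         current = sequences[-1]
--         next_sequence = []
--
--         for i in range(len(current) - 1):
--             diff = current[i + 1] - current[i]
--             next_sequence.append(diff)
--
--         sequences.append(next_sequence)
--
--     return [sequence[-1] for sequence in sequences]
-- ===== SOURCE B (Python) =====
-- def getLastNumbersOfDifferenceSequences(history: list[int]) -> list[int]: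
--     # Single left-to-right pass: maintain the diagonal of the difference
--     # pyramid (newest element of every difference row) plus a per-row flag
--     # recording whether any element of that row seen so far is nonzero.
--     diag = []   # diag[k] = newest element of difference row k
--     seen = []   # seen[k] = True iff some element of row k so far is nonzero
--     for v in history:
--         new_diag = []
--         top = v
--         for d in diag:
--             new_diag.append(top)
--             top = top - d
--         new_diag.append(top)
--         diag = new_diag
--         seen = [s or x != 0 for s, x in zip(seen, diag)] + [diag[-1] != 0]
--     depth = seen.index(False)
--     return diag[:depth + 1]
-- ===== Notes on version B (the rewrite author's own statement) =====
-- stated objective: alternative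
-- what changed: B replaces A's row-by-row construction of the whole difference pyramid with a single left-to-right pass over the input that maintains the pyramid's diagonal (the newest element of every difference row, updated Pascal-style per input value) and per-row nonzero flags, then truncates the final diagonal at the first vanished row (seen.index(False)); it trades A's early exit at the pyramid depth d for O(n) extra space instead of A's O(n*d) stored rows.
import Mathlib
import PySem

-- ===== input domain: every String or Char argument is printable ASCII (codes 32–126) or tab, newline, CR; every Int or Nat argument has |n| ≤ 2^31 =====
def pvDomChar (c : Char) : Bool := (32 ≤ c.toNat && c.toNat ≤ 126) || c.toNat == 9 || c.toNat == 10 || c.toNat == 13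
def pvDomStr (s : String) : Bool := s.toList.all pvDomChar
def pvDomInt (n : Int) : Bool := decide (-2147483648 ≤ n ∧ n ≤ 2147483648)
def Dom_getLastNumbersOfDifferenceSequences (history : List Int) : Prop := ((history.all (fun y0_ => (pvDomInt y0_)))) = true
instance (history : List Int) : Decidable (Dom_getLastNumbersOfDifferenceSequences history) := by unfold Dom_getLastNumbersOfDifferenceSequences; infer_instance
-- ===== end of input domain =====

-- B replaces A's row-by-row difference pyramid with a single left-to-right pass that maintains
-- the pyramid's diagonal (the newest element of every row) plus per-row nonzero flags
-- (objective: alternative algorithm; O(n) extra space instead of all stored rows, no early exit).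

-- ===== PORT A =====
-- for i in range(len(current) - 1): next_sequence.append(current[i+1] - current[i])
def pvNextSeq (current : List Int) : List Int :=
  (PySem.List.pyRange 0 ((current.length : Int) - 1) 1).foldl
    (fun acc i => acc ++ [PySem.List.pyGetD current (i + 1) 0 - PySem.List.pyGetD current i 0]) []

lemma pvNextSeq_eq_map (current : List Int) :
    pvNextSeq current = (PySem.List.pyRange 0 ((current.length : Int) - 1) 1).map
      (fun i => PySem.List.pyGetD current (i + 1) 0 - PySem.List.pyGetD current i 0) := by
  unfold pvNextSeq
  rw [PySem.List.foldl_append_singleton_eq_map]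
  rfl

lemma length_pvNextSeq (current : List Int) :
    (pvNextSeq current).length = ((current.length : Int) - 1).toNat := by
  rw [pvNextSeq_eq_map, List.length_map, PySem.List.length_pyRange_one]
  omega

-- while not all(x == 0 for x in sequences[-1]): … sequences.append(next_sequence)
-- (current carries the value of sequences[-1])
def pvALoop (sequences : List (List Int)) (current : List Int) : List (List Int) :=
  if h : current.all (fun x => x == 0) then sequences
  else pvALoop (sequences ++ [pvNextSeq current]) (pvNextSeq current)
termination_by current.length
decreasing_by
  have hne : current ≠ [] := by intro hnil; subst hnil; simp at h
  have : 0 < current.length := List.length_pos_iff.mpr hne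
  rw [length_pvNextSeq]; omega

-- [sequence[-1] for sequence in sequences]
def getLastNumbersOfDifferenceSequences (history : List Int) : List Int :=
  (pvALoop [history] history).map (fun s => PySem.List.pyGetD s (-1) 0)

-- ===== PORT B =====
-- inner loop: new_diag = []; top = v; for d in diag: new_diag.append(top); top = top - d;
-- then new_diag.append(top)  (builds the list left to right)
def pvScan (top : Int) : List Int → List Int
  | [] => [top]
  | d :: ds => top :: pvScan (top - d) ds

-- seen = [s or x != 0 for s, x in zip(seen, diag)] + [diag[-1] != 0]
def pvSeenUpd (seen : List Bool) (diag : List Int) : List Bool :=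
  (seen.zip diag).map (fun p => p.1 || p.2 != 0) ++ [PySem.List.pyGetD diag (-1) 0 != 0]

-- one iteration of the 'for v in history' loop over the state (diag, seen)
def pvBStep (st : List Int × List Bool) (v : Int) : List Int × List Bool :=
  let diag := pvScan v st.1
  (diag, pvSeenUpd st.2 diag)

-- depth = seen.index(False)  (ValueError when absent, outside Pre_: default 0)
def getLastNumbersOfDifferenceSequences_alt (history : List Int) : List Int :=
  let st := history.foldl pvBStep ([], [])
  let depth := (PySem.List.index? st.2 false).getD 0
  st.1.take (depth + 1)

-- ===== PRECONDITION & SPEC =====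
-- the k-th finite difference sequence of a list (spec-level, used only by Pre_ and the proofs)
def pvDiffs (l : List Int) : List Int := (l.zip l.tail).map (fun p => p.2 - p.1)

-- Python A raises IndexError ([][-1]) exactly unless some finite difference sequence of
-- history (of order < len(history)) vanishes identically; Pre_ admits exactly the inputs
-- on which A returns a value (on the excluded inputs A raises; B's natural value there
-- is the last element of each row it saw).
def Pre_getLastNumbersOfDifferenceSequences (history : List Int) : Prop :=
  ∃ k < history.length, (pvDiffs^[k] history).all (fun x => x == 0) = true
instance (history : List Int) : Decidable (Pre_getLastNumbersOfDifferenceSequences history) := by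
  unfold Pre_getLastNumbersOfDifferenceSequences; infer_instance

def pvWitness_getLastNumbersOfDifferenceSequences : List Int := [1, 3, 6, 10]

def Spec_getLastNumbersOfDifferenceSequences (history : List Int) (out : List Int) : Prop := out = getLastNumbersOfDifferenceSequences_alt history
instance (history : List Int) (out : List Int) : Decidable (Spec_getLastNumbersOfDifferenceSequences history out) := by unfold Spec_getLastNumbersOfDifferenceSequences; infer_instance

-- ===== CLAIM =====
def Claim_equal_getLastNumbersOfDifferenceSequences : Prop := ∀ (history : List Int), Dom_getLastNumbersOfDifferenceSequences history → Pre_getLastNumbersOfDifferenceSequences history → Spec_getLastNumbersOfDifferenceSequences history (getLastNumbersOfDifferenceSequences history)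

-- ===== LEMMAS AND PROOFS =====

lemma pvDiffs_cons (a b : Int) (t : List Int) :
    pvDiffs (a :: b :: t) = (b - a) :: pvDiffs (b :: t) := by
  simp [pvDiffs]

lemma length_pvDiffs (l : List Int) : (pvDiffs l).length = l.length - 1 := by
  simp [pvDiffs]

lemma pyLast_eq_getLastD (l : List Int) (h : l ≠ []) :
    PySem.List.pyGetD l (-1) 0 = l.getLastD 0 := by
  rw [PySem.List.pyGetD_neg_one l 0 h, List.getLastD_eq_getLast?, List.getLast?_eq_some_getLast h]
  rfl

-- A's index loop builds exactly the spec-level difference row.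
lemma pvNextSeq_eq_pvDiffs (cur : List Int) : pvNextSeq cur = pvDiffs cur := by
  have hlen : (pvNextSeq cur).length = (pvDiffs cur).length := by
    rw [length_pvNextSeq, length_pvDiffs]; omega
  apply List.ext_getElem hlen
  intro k hk1 hk2
  have hklt : k < cur.length - 1 := by
    have := length_pvDiffs cur; omega
  have hk' : k < (PySem.List.pyRange 0 ((cur.length : Int) - 1) 1).length := by
    rw [PySem.List.length_pyRange_one]; omega
  rw [List.getElem_of_eq (pvNextSeq_eq_map cur) hk1]
  rw [List.getElem_map, PySem.List.getElem_pyRange_one]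
  have h2 : ((k : Int)) + 1 = (((k + 1 : Nat) : Int)) := by push_cast; omega
  simp only [Int.zero_add] at *
  rw [h2, PySem.List.pyGetD_natCast, PySem.List.pyGetD_natCast]
  have hkc : k < cur.length := by omega
  have hkc1 : k + 1 < cur.length := by omega
  rw [List.getD_eq_getElem cur 0 hkc1, List.getD_eq_getElem cur 0 hkc]
  simp [pvDiffs, List.getElem_zip, List.getElem_tail]

lemma length_iter_pvDiffs (k : Nat) (l : List Int) :
    (pvDiffs^[k] l).length = l.length - k := by
  induction k generalizing l with
  | zero => simp
  | succ k ih =>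
      rw [Function.iterate_succ_apply', length_pvDiffs, ih]; omega

lemma pvDiffs_append (l : List Int) (v : Int) (h : l ≠ []) :
    pvDiffs (l ++ [v]) = pvDiffs l ++ [v - l.getLastD 0] := by
  induction l with
  | nil => exact absurd rfl h
  | cons a t ih =>
      cases t with
      | nil => simp [pvDiffs]
      | cons b t' =>
          have : (a :: b :: t') ++ [v] = a :: ((b :: t') ++ [v]) := by simp
          rw [this]
          have h2 : (b :: t') ++ [v] = b :: (t' ++ [v]) := by simp
          rw [h2, pvDiffs_cons, ← h2, ih (by simp), pvDiffs_cons]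
          simp

-- the running 'top' values produced while scanning the diagonal
def pvT (p : List Int) (v : Int) : Nat → Int
  | 0 => v
  | k+1 => pvT p v k - (pvDiffs^[k] p).getLastD 0

lemma iter_pvDiffs_append (p : List Int) (v : Int) :
    ∀ k, k ≤ p.length → pvDiffs^[k] (p ++ [v]) = pvDiffs^[k] p ++ [pvT p v k] := by
  intro k
  induction k with
  | zero => intro _; simp [pvT]
  | succ k ih =>
      intro hk
      have hne : pvDiffs^[k] p ≠ [] := by
        intro hnil
        have := length_iter_pvDiffs k p
        rw [hnil] at this
        simp at this; omega
      rw [Function.iterate_succ_apply', Function.iterate_succ_apply',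
          ih (by omega), pvDiffs_append _ _ hne]
      rfl

-- generic scan characterisation
def pvIter (top : Int) (g : Nat → Int) : Nat → Int
  | 0 => top
  | k+1 => pvIter top g k - g k

lemma pvIter_shift (top : Int) (g : Nat → Int) :
    ∀ k, pvIter (top - g 0) (fun j => g (j+1)) k = pvIter top g (k+1) := by
  intro k
  induction k with
  | zero => rfl
  | succ k ih => show pvIter _ _ k - _ = _; rw [ih]; rfl

lemma pvScan_spec : ∀ (m : Nat) (g : Nat → Int) (top : Int),
    pvScan top ((List.range m).map g) = (List.range (m+1)).map (fun k => pvIter top g k) := by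
  intro m
  induction m with
  | zero => intro g top; simp [pvScan, pvIter]
  | succ m ih =>
      intro g top
      rw [List.range_succ_eq_map, List.range_succ_eq_map (n := m + 1)]
      simp only [List.map_cons, List.map_map]
      show pvScan top (g 0 :: _) = _
      rw [pvScan]
      have := ih (fun j => g (j+1)) (top - g 0)
      have hmap : (List.range m).map (g ∘ Nat.succ) = (List.range m).map (fun j => g (j+1)) := by
        apply List.map_congr_left; intro x _; rfl
      rw [hmap, this]
      have htail : List.map (fun k => pvIter (top - g 0) (fun j => g (j+1)) k) (List.range (m+1))
          = List.map ((fun k => pvIter top g k) ∘ Nat.succ) (List.range (m+1)) :=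
        List.map_congr_left (fun x _ => by
          simp only [Function.comp_apply]
          exact pvIter_shift top g x)
      rw [htail]
      rfl

lemma pvT_eq_pvIter (p : List Int) (v : Int) :
    ∀ k, pvT p v k = pvIter v (fun j => (pvDiffs^[j] p).getLastD 0) k := by
  intro k
  induction k with
  | zero => rfl
  | succ k ih => show pvT p v k - _ = pvIter _ _ k - _; rw [ih]

-- specification of B's loop state after processing a prefix p
def pvDiagSpec (p : List Int) : List Int :=
  (List.range p.length).map (fun k => (pvDiffs^[k] p).getLastD 0)
def pvSeenSpec (p : List Int) : List Bool :=
  (List.range p.length).map (fun k => (pvDiffs^[k] p).any (fun x => x != 0))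

lemma zip_range_maps (f : Nat → Bool) (g : Nat → Int) :
    ∀ n, ((List.range n).map f).zip ((List.range (n+1)).map g)
      = (List.range n).map (fun k => (f k, g k)) := by
  intro n
  apply List.ext_getElem
  · simp
  · intro i h1 h2
    simp [List.getElem_zip]

lemma pvDiag_step (p : List Int) (v : Int) :
    pvScan v (pvDiagSpec p) = pvDiagSpec (p ++ [v]) := by
  unfold pvDiagSpec
  rw [pvScan_spec p.length (fun k => (pvDiffs^[k] p).getLastD 0) v]
  rw [List.length_append]
  apply List.map_congr_left
  intro k hk
  have hk' : k ≤ p.length := by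
    have := List.mem_range.mp hk; omega
  rw [← pvT_eq_pvIter, iter_pvDiffs_append p v k hk']
  simp

lemma pvSeen_step (p : List Int) (v : Int) :
    pvSeenUpd (pvSeenSpec p) (pvDiagSpec (p ++ [v])) = pvSeenSpec (p ++ [v]) := by
  unfold pvSeenUpd pvSeenSpec pvDiagSpec
  rw [List.length_append]
  simp only [List.length_cons, List.length_nil]
  rw [zip_range_maps]
  have hlast : PySem.List.pyGetD
      ((List.range (p.length + 1)).map (fun k => (pvDiffs^[k] (p ++ [v])).getLastD 0)) (-1) 0
      = (pvDiffs^[p.length] (p ++ [v])).getLastD 0 := by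
    rw [List.range_succ, List.map_append]
    exact PySem.List.pyGetD_neg_one_append_singleton _ _ _
  rw [hlast]
  rw [List.range_succ (n := p.length), List.map_append, List.map_map]
  congr 1
  · apply List.map_congr_left
    intro k hk
    have hk' : k ≤ p.length := by have := List.mem_range.mp hk; omega
    simp only [Function.comp]
    rw [iter_pvDiffs_append p v k hk']
    simp [List.any_append]
  · simp only [List.map_cons, List.map_nil]
    rw [iter_pvDiffs_append p v p.length (le_refl _)]
    have hnil : pvDiffs^[p.length] p = [] := by
      have hlen0 : (pvDiffs^[p.length] p).length = 0 := by
        rw [length_iter_pvDiffs]; omega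
      exact List.length_eq_zero_iff.mp hlen0
    rw [hnil]
    simp

lemma pvFold_inv (p : List Int) :
    p.foldl pvBStep ([], []) = (pvDiagSpec p, pvSeenSpec p) := by
  induction p using List.reverseRecOn with
  | nil => simp [pvDiagSpec, pvSeenSpec]
  | append_singleton p v ih =>
      rw [List.foldl_append, List.foldl_cons, List.foldl_nil, ih]
      unfold pvBStep
      simp only
      rw [pvDiag_step, pvSeen_step]

-- depth computation: seen.index(False) finds the first all-zero row
lemma index_false_spec : ∀ (l : List Bool) (d : Nat), d < l.length →
    (∀ k, k < d → l.getD k false = true) → l.getD d false = false →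
    PySem.List.index? l false = some d := by
  intro l
  induction l with
  | nil => intro d hd; simp at hd
  | cons b t ih =>
      intro d hd hpre hat
      cases d with
      | zero =>
          simp at hat
          rw [hat]
          simp [PySem.List.index?_eq_idxOf?, List.idxOf?_cons]
      | succ d =>
          have hb : b = true := by have := hpre 0 (Nat.succ_pos d); simpa using this
          rw [hb]
          have h1 : PySem.List.index? t false = some d := by
            apply ih d (by simpa using hd)
            · intro k hk
              have := hpre (k+1) (by omega)
              simpa using this
            · simpa using hat
          simp [PySem.List.index?_eq_idxOf?, List.idxOf?_cons] at h1 ⊢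
          simp [h1]

lemma all_zero_iff_not_any (cur : List Int) :
    cur.all (fun x => x == 0) = !cur.any (fun x => x != 0) := by
  induction cur with
  | nil => rfl
  | cons a t ih => simp [List.all_cons, List.any_cons, ih, Bool.not_or, bne]

-- A's loop produces exactly the rows 0..d of the difference pyramid
lemma pvALoop_spec : ∀ (d : Nat) (cur : List Int),
    (∀ k, k < d → (pvDiffs^[k] cur).all (fun x => x == 0) = false) →
    (pvDiffs^[d] cur).all (fun x => x == 0) = true →
    ∀ pre, pvALoop (pre ++ [cur]) cur = pre ++ (List.range (d+1)).map (fun k => pvDiffs^[k] cur) := by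
  intro d
  induction d with
  | zero =>
      intro cur _ hall pre
      rw [pvALoop]
      simp only [Function.iterate_zero, id] at hall
      rw [dif_pos hall]
      simp
  | succ d ih =>
      intro cur hmin hall pre
      have h0 : cur.all (fun x => x == 0) = false := by
        have := hmin 0 (Nat.succ_pos d)
        simpa using this
      rw [pvALoop, dif_neg (by rw [h0]; simp), pvNextSeq_eq_pvDiffs]
      have hstep : ∀ k, pvDiffs^[k] (pvDiffs cur) = pvDiffs^[k+1] cur := by
        intro k; rw [Function.iterate_succ_apply]
      have := ih (pvDiffs cur)
        (fun k hk => by rw [hstep]; exact hmin (k+1) (by omega))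
        (by rw [hstep]; exact hall)
        (pre ++ [cur])
      rw [this]
      rw [List.append_assoc]
      congr 1
      rw [List.range_succ_eq_map (n := d + 1), List.map_cons, List.map_map]
      simp only [Function.iterate_zero, id, List.singleton_append]
      congr 1

-- getD of a map over range
lemma getD_map_range' (n k : Nat) (f : Nat → Bool) (hk : k < n) :
    ((List.range n).map f).getD k false = f k := by
  rw [List.getD_eq_getElem _ _ (by simpa using hk)]
  simp

-- ===== VERDICT =====
theorem getLastNumbersOfDifferenceSequences_spec : Claim_equal_getLastNumbersOfDifferenceSequences := by
  intro history _ hPre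
  unfold Spec_getLastNumbersOfDifferenceSequences
  obtain ⟨k0, hk0n, hk0⟩ := hPre
  have hEx : ∃ k, (pvDiffs^[k] history).all (fun x => x == 0) = true := ⟨k0, hk0⟩
  set d := Nat.find hEx with hd_def
  have hd : (pvDiffs^[d] history).all (fun x => x == 0) = true := Nat.find_spec hEx
  have hmin : ∀ k, k < d → (pvDiffs^[k] history).all (fun x => x == 0) = false := by
    intro k hk
    have := Nat.find_min hEx hk
    exact Bool.eq_false_iff.mpr this
  have hdn : d < history.length := lt_of_le_of_lt (Nat.find_min' hEx hk0) hk0n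
  -- A's value
  have hA : getLastNumbersOfDifferenceSequences history
      = (List.range (d+1)).map (fun k => PySem.List.pyGetD (pvDiffs^[k] history) (-1) 0) := by
    unfold getLastNumbersOfDifferenceSequences
    have := pvALoop_spec d history hmin hd []
    simp only [List.nil_append] at this
    rw [this, List.map_map]
    rfl
  -- B's value
  have hB : getLastNumbersOfDifferenceSequences_alt history
      = (List.range (d+1)).map (fun k => (pvDiffs^[k] history).getLastD 0) := by
    unfold getLastNumbersOfDifferenceSequences_alt
    rw [pvFold_inv]
    simp only
    have hdepth : PySem.List.index? (pvSeenSpec history) false = some d := by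
      apply index_false_spec _ d
      · unfold pvSeenSpec; simpa using hdn
      · intro k hk
        unfold pvSeenSpec
        rw [getD_map_range' _ _ _ (by omega)]
        have := hmin k hk
        rw [all_zero_iff_not_any] at this
        cases hc : (pvDiffs^[k] history).any (fun x => x != 0)
        · rw [hc] at this; simp at this
        · rfl
      · unfold pvSeenSpec
        rw [getD_map_range' _ _ _ hdn]
        have := hd
        rw [all_zero_iff_not_any] at this
        cases hc : (pvDiffs^[d] history).any (fun x => x != 0)
        · rfl
        · rw [hc] at this; simp at this
    rw [hdepth]
    simp only [Option.getD_some]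
    unfold pvDiagSpec
    rw [← List.map_take, List.take_range]
    have hmin' : min (d + 1) history.length = d + 1 := by omega
    rw [hmin']
  rw [hA, hB]
  apply List.map_congr_left
  intro k hk
  have hk' : k ≤ d := by have := List.mem_range.mp hk; omega
  have hne : pvDiffs^[k] history ≠ [] := by
    intro hnil
    have := length_iter_pvDiffs k history
    rw [hnil] at this
    simp at this; omega
  rw [pyLast_eq_getLastD _ hne]
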